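-- pv_equiv track=rewrite | github.com/ideven85/Machine_Learning_Algorithms | core_python/6_101/Week6/generate_legit_words.py | generate_subsequences_slow_helper
-- ===== SOURCE A (Python) =====
-- def generate_subsequences_slow_helper(word):
--     if not word:
--         return {""}
--     first = word[0]
--     rest = word[1:]
--     out = set()
--     for w in generate_subsequences_slow_helper(rest):
--         out.add(w)
--         for index in range(len(w) + 1):
--             out.add(w[:index] + first + w[index:])
--     return out
-- ===== SOURCE B (Python) =====
-- def generate_subsequences_slow_helper(word):
--     result = {""}
--     for c in reversed(word):
--         nxt = set()
--         for w in result: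
--             nxt.update([w] + [w[:i] + c + w[i:] for i in range(len(w) + 1)])
--         result = nxt
--     return result
-- ===== Notes on version B (the rewrite author's own statement) =====
-- stated objective: simpler
-- what changed: Replaces A's tail-first recursion (which rebuilds a set at every recursion level) by a single iterative accumulator loop over reversed(word), each step rebuilding the set from comprehension-built candidate lists via set.update instead of nested add calls.
import Mathlib
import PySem

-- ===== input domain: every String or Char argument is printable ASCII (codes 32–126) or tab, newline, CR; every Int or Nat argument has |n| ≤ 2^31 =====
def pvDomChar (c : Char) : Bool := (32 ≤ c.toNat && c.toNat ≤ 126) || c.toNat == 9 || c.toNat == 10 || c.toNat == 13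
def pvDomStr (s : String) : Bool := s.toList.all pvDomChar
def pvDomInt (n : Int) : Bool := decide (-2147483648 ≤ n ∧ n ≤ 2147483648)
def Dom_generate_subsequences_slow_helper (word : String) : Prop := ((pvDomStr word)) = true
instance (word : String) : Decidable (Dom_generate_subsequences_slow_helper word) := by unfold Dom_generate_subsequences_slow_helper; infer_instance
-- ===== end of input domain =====

-- B replaces A's tail-first recursion by an iterative accumulator loop over reversed(word)
-- building each step's set from comprehension-built candidate lists via set.update (objective: simpler).
-- Both return a Python set; the ports fix PySem.Set's deterministic insertion order for it.

-- ===== PORT A =====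
-- w[:i] + c + w[i:] for 0 ≤ i ≤ len(w): exact as take/drop on the character list.
def pvInsAt (c : Char) (w : String) (i : Nat) : String :=
  String.ofList (w.toList.take i ++ c :: w.toList.drop i)

-- recursion of A on the character list (word[0] / word[1:] = head / tail; 'not word' = []);
-- range(len(w)+1) has nonnegative bounds and step 1, exact as List.range (len+1).
def pvACore : List Char → PySem.Set String
  | [] => PySem.Set.ofList [""]
  | first :: rest =>
      (pvACore rest).foldl
        (fun out w =>
          (List.range (w.toList.length + 1)).foldl
            (fun out2 index => PySem.Set.add out2 (pvInsAt first w index))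
            (PySem.Set.add out w))
        PySem.Set.empty

def generate_subsequences_slow_helper (word : String) : List String :=
  pvACore word.toList

-- ===== PORT B =====
-- one loop step: nxt = set(); for w in result: nxt.update([w] + [w[:i]+c+w[i:] for i in range(len(w)+1)])
def pvStepB (result : PySem.Set String) (c : Char) : PySem.Set String :=
  result.foldl
    (fun nxt w =>
      PySem.Set.update nxt (w :: (List.range (w.toList.length + 1)).map (pvInsAt c w)))
    PySem.Set.empty

def generate_subsequences_slow_helper_alt (word : String) : List String :=
  word.toList.reverse.foldl pvStepB (PySem.Set.ofList [""])

-- ===== PRECONDITION & SPEC =====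
def Spec_generate_subsequences_slow_helper (word : String) (out : List String) : Prop := out = generate_subsequences_slow_helper_alt word
instance (word : String) (out : List String) : Decidable (Spec_generate_subsequences_slow_helper word out) := by unfold Spec_generate_subsequences_slow_helper; infer_instance

-- ===== CLAIM (what is proved, stated in full; the proofs are below) =====
def Claim_equal_generate_subsequences_slow_helper : Prop := ∀ (word : String), Dom_generate_subsequences_slow_helper word → Spec_generate_subsequences_slow_helper word (generate_subsequences_slow_helper word)

-- ===== LEMMAS AND PROOFS =====

-- A's per-element body (add w, then add each insertion) is B's update with the candidate list.
lemma pvBody_eq (c : Char) :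
    (fun (out : PySem.Set String) (w : String) =>
      (List.range (w.toList.length + 1)).foldl
        (fun out2 index => PySem.Set.add out2 (pvInsAt c w index))
        (PySem.Set.add out w))
    = (fun (nxt : PySem.Set String) (w : String) =>
      PySem.Set.update nxt (w :: (List.range (w.toList.length + 1)).map (pvInsAt c w))) := by
  funext out w
  simp [PySem.Set.update, List.foldl_map, List.foldl_cons]

-- the recursion unrolls to the reversed-fold
lemma pvCore_eq (cs : List Char) :
    pvACore cs = cs.reverse.foldl pvStepB (PySem.Set.ofList [""]) := by
  induction cs with
  | nil => rfl
  | cons c rest ih =>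
      rw [List.reverse_cons, List.foldl_append, ← ih]
      show pvACore (c :: rest) = pvStepB (pvACore rest) c
      simp only [pvACore, pvStepB, pvBody_eq c]

-- ===== VERDICT (by name: the statement is the Claim_ definition above) =====
theorem generate_subsequences_slow_helper_spec : Claim_equal_generate_subsequences_slow_helper := by
  intro word _
  show generate_subsequences_slow_helper word = generate_subsequences_slow_helper_alt word
  simpa [generate_subsequences_slow_helper, generate_subsequences_slow_helper_alt] using
    pvCore_eq word.toList
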